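-- pv_equiv track=rewrite | github.com/Egorbobkov/training_on_algorithms_from_Yandex | Trening_1/Task_1/ex_5.py | count_detail
-- ===== SOURCE A (Python) =====
-- def count_detail(N, K, M):
--     if M > K:
--         return 0
--
--     total = 0
--     metal = N
--
--     while metal >= K:
--         count_blank = metal // K
--         remains_metal = metal % K
--
--         count_details = (K // M) * count_blank
--         remains_metal_details = (K % M) * count_blank
--
--         total += count_details
--         metal = remains_metal + remains_metal_details
--
--     return total
-- ===== SOURCE B (Python) =====
-- def count_detail(N, K, M):
--     # Closed form, no loop: each blank consumes K metal and gives back K % M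
--     # as scrap, so every blank lowers the stock by cost = K - K % M; a blank
--     # is made while the stock is still >= K, hence (N - K) // cost + 1 blanks
--     # in total, each yielding K // M details.
--     if M > K or N < K:
--         return 0
--     cost = K - K % M
--     blanks = (N - K) // cost + 1
--     return (K // M) * blanks
-- ===== Notes on version B (the rewrite author's own statement) =====
-- stated objective: alternative
-- what changed: Replaces A's simulation loop entirely with an O(1) closed form: each blank lowers the stock by cost = K - K % M, so the number of blanks is (N - K) // cost + 1 and the answer is (K // M) times that.
-- outside the precondition, e.g. on count_detail(100, 3, -2): A returns -66, B returns -50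
import Mathlib
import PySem

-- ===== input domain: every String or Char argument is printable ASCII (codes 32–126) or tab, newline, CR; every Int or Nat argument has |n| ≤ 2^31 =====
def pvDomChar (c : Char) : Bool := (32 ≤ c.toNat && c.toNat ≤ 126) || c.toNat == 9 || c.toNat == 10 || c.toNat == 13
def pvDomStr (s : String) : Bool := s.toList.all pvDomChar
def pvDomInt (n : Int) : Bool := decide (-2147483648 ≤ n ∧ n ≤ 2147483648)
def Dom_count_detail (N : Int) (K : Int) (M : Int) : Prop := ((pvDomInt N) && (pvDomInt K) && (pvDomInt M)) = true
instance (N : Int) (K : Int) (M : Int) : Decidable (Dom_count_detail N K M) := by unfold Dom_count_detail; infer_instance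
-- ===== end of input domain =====

-- B replaces A's simulation loop with an O(1) closed form (blank count from the
-- per-blank metal cost K - K % M); equivalence is claimed on K > 0, M > 0.

-- ===== PORT A =====
-- the while loop of A over state (total, metal); fuel only makes the recursion total,
-- under Pre_ it is ample (each iteration strictly decreases metal, which stays ≥ K ≥ 1)
def pvLoopA (K M : Int) : Nat → Int → Int → Int × Int
  | 0, total, metal => (total, metal)
  | fuel + 1, total, metal =>
      if K ≤ metal then
        let count_blank := PySem.Int.floordiv metal K
        let remains_metal := PySem.Int.mod metal K
        let count_details := (PySem.Int.floordiv K M) * count_blank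
        let remains_metal_details := (PySem.Int.mod K M) * count_blank
        pvLoopA K M fuel (total + count_details) (remains_metal + remains_metal_details)
      else (total, metal)

def count_detail (N : Int) (K : Int) (M : Int) : Int :=
  if M > K then 0
  else (pvLoopA K M (N.toNat + 1) 0 N).1

-- ===== PORT B =====
def count_detail_alt (N : Int) (K : Int) (M : Int) : Int :=
  if M > K ∨ N < K then 0
  else
    let cost := K - PySem.Int.mod K M
    let blanks := PySem.Int.floordiv (N - K) cost + 1
    (PySem.Int.floordiv K M) * blanks

-- ===== PRECONDITION & SPEC =====
-- Pre_ excludes (a) inputs where Python A raises ZeroDivisionError or loops forever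
-- (K ≤ 0 or M = 0 with the loop entered), and (b) negative M — a negative amount of
-- metal per detail, outside the task's natural domain — where A's batched recycling
-- overshoots past the last affordable blank while B counts per-blank exchanges.
def Pre_count_detail (N : Int) (K : Int) (M : Int) : Prop :=
  M > K ∨ N < K ∨ (0 < K ∧ 0 < M)
instance (N : Int) (K : Int) (M : Int) : Decidable (Pre_count_detail N K M) := by
  unfold Pre_count_detail; infer_instance

def pvWitness_count_detail : Int × Int × Int := (10, 3, 2)

def Spec_count_detail (N : Int) (K : Int) (M : Int) (out : Int) : Prop := out = count_detail_alt N K M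
instance (N : Int) (K : Int) (M : Int) (out : Int) : Decidable (Spec_count_detail N K M out) := by unfold Spec_count_detail; infer_instance

-- ===== CLAIM (what is proved, stated in full; the proofs are below) =====
def Claim_equal_count_detail : Prop := ∀ (N : Int) (K : Int) (M : Int), Dom_count_detail N K M → Pre_count_detail N K M → Spec_count_detail N K M (count_detail N K M)

-- ===== LEMMAS AND PROOFS =====

-- when the guard fails, the loop returns its accumulator unchanged, for any fuel
theorem pvLoopA_stop (K M : Int) (fuel : Nat) (total metal : Int) (h : ¬ K ≤ metal) :
    (pvLoopA K M fuel total metal).1 = total := by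
  cases fuel with
  | zero => simp [pvLoopA]
  | succ n => simp [pvLoopA, h]

-- closed form of the loop: with cost c = K - K % M, the number of blanks ever made
-- from `metal ≥ K` is (metal - K) // c + 1, each worth K // M details
theorem pvLoopA_closed (K M : Int) (hK : 0 < K) (hM : 0 < M) (hMK : M ≤ K) :
    ∀ (fuel : Nat) (total metal : Int), K ≤ metal → metal ≤ (fuel : Int) →
      (pvLoopA K M fuel total metal).1
        = total + PySem.Int.floordiv K M *
            (PySem.Int.floordiv (metal - K) (K - PySem.Int.mod K M) + 1) := by
  intro fuel
  induction fuel with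
  | zero => intro total metal hKm hf; exfalso; simp at hf; omega
  | succ n ih =>
      intro total metal hKm hf
      set d := PySem.Int.floordiv K M with hd
      set c := K - PySem.Int.mod K M with hc
      -- basic facts
      have hKM1 : PySem.Int.floordiv K M * M + PySem.Int.mod K M = K :=
        PySem.Int.floordiv_mul_add_mod K M
      have hmod_nonneg : 0 ≤ PySem.Int.mod K M := by
        rw [PySem.Int.mod_eq_emod_of_pos hM]; exact Int.emod_nonneg K (by omega)
      have hmod_lt : PySem.Int.mod K M < M := by
        rw [PySem.Int.mod_eq_emod_of_pos hM]; exact Int.emod_lt_of_pos K hM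
      have hcpos : 0 < c := by omega
      set q := PySem.Int.floordiv metal K with hq
      set r := PySem.Int.mod metal K with hr
      have hqr : q * K + r = metal := PySem.Int.floordiv_mul_add_mod metal K
      have hr_nonneg : 0 ≤ r := by
        rw [hr, PySem.Int.mod_eq_emod_of_pos hK]; exact Int.emod_nonneg metal (by omega)
      have hr_lt : r < K := by
        rw [hr, PySem.Int.mod_eq_emod_of_pos hK]; exact Int.emod_lt_of_pos metal hK
      have hq1 : 1 ≤ q := by
        rw [hq, PySem.Int.le_floordiv_iff_mul_le hK]; omega
      -- the new metal after one batch
      have hmetal' : r + PySem.Int.mod K M * q = metal - q * c := by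
        rw [hc]; ring_nf; nlinarith [hqr, hKM1]
      simp only [pvLoopA, if_pos hKm]
      rw [← hd, ← hq, ← hr, hmetal']
      by_cases h2 : K ≤ metal - q * c
      · -- loop continues: apply the induction hypothesis
        have hqc1 : 1 ≤ q * c := by nlinarith
        have hstep : metal - q * c ≤ (n : Int) := by
          push_cast at hf ⊢; omega
        rw [ih (total + d * q) (metal - q * c) h2 hstep]
        -- shift of the floordiv by q steps of size c
        have ht := (PySem.Int.floordiv_eq_iff_of_pos (q := PySem.Int.floordiv (metal - q * c - K) c) hcpos).mp rfl
        have : PySem.Int.floordiv (metal - K) c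
            = PySem.Int.floordiv (metal - q * c - K) c + q := by
          rw [PySem.Int.floordiv_eq_iff_of_pos hcpos]
          constructor <;> nlinarith [ht.1, ht.2]
        rw [this]; ring
      · -- loop stops next time
        rw [pvLoopA_stop K M n _ _ h2]
        have : PySem.Int.floordiv (metal - K) c = q - 1 := by
          rw [PySem.Int.floordiv_eq_iff_of_pos hcpos]
          have hlow : 0 ≤ PySem.Int.mod K M * (q - 1) :=
            mul_nonneg hmod_nonneg (by omega)
          constructor
          · nlinarith [hmetal']
          · nlinarith
        rw [this]; ring

-- ===== VERDICT (by name: the statement is the Claim_ definition above) =====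
theorem count_detail_spec : Claim_equal_count_detail := by
  intro N K M _ hpre
  unfold Spec_count_detail count_detail count_detail_alt
  by_cases hMK : M > K
  · simp [hMK]
  · rw [if_neg hMK]
    by_cases hNK : N < K
    · rw [if_pos (Or.inr hNK)]
      exact pvLoopA_stop K M _ 0 N (by omega)
    · rw [if_neg (by tauto)]
      obtain ⟨hK, hM⟩ : 0 < K ∧ 0 < M := by
        rcases hpre with h | h | h
        · exact absurd h hMK
        · exact absurd h hNK
        · exact h
      have hfuel : N ≤ ((N.toNat + 1 : Nat) : Int) := by
        push_cast; omega
      rw [pvLoopA_closed K M hK hM (by omega) (N.toNat + 1) 0 N (by omega) hfuel]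
      ring
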